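-- pv_equiv track=rewrite | github.com/AlKuz/PyMechTurk | pymechturk/qualification/xml_generator.py | _encode_for_url
-- ===== SOURCE A (Python) =====
-- def _encode_for_url(text: str) -> str:
--     """
--     Data must be URL encoded to appear as a single parameter value in the request. Characters that are part of URL
--     syntax, such as question marks (?) and ampersands (&), must be replaced with the corresponding URL character
--     codes.
--     """
--     encoder = [
--         ("$", "%24"),
--         ("&", "%26"),
--         ("+", "%2B"),
--         (",", "%2C"),
--         ("/", "%2F"),
--         (":", "%3A"),
--         (";", "%3B"),
--         ("?", "%3F"),
--         ("@", "%40")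
--     ]
--     for char, code in encoder:
--         text = text.replace(char, code)
--     return text
-- ===== SOURCE B (Python) =====
-- def _encode_for_url(text: str) -> str:
--     codes = {
--         "$": "%24",
--         "&": "%26",
--         "+": "%2B",
--         ",": "%2C",
--         "/": "%2F",
--         ":": "%3A",
--         ";": "%3B",
--         "?": "%3F",
--         "@": "%40",
--     }
--     return "".join(codes.get(c, c) for c in text)
-- ===== Notes on version B (the rewrite author's own statement) =====
-- stated objective: idiomatic
-- what changed: Replaces nine sequential full-string .replace passes with a single pass over the input characters, emitting a dict lookup per character and joining; valid because no replacement code contains a character the table maps.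
import Mathlib
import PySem

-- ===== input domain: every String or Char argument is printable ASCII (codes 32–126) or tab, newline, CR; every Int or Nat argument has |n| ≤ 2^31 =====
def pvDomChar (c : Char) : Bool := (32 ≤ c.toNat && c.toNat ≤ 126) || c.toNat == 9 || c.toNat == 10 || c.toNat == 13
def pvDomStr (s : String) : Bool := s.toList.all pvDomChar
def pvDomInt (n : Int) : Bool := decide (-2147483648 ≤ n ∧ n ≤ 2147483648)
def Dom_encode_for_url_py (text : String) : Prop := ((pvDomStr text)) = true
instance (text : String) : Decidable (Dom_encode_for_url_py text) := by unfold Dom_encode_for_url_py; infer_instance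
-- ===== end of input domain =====

-- B replaces nine sequential full-string .replace passes with one pass over the input characters using a lookup table (idiomatic; same results since no code contains a mapped character).

-- ===== PORT A =====
def encode_for_url_py (text : String) : String :=
  let encoder : List (String × String) :=
    [("$", "%24"), ("&", "%26"), ("+", "%2B"), (",", "%2C"), ("/", "%2F"),
     (":", "%3A"), (";", "%3B"), ("?", "%3F"), ("@", "%40")]
  encoder.foldl (fun t p => PySem.Str.replace t p.1 p.2) text

-- ===== PORT B =====
def pvCodes : PySem.Dict Char String :=
  PySem.Dict.ofList
    [('$', "%24"), ('&', "%26"), ('+', "%2B"), (',', "%2C"), ('/', "%2F"),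
     (':', "%3A"), (';', "%3B"), ('?', "%3F"), ('@', "%40")]

def encode_for_url_py_alt (text : String) : String :=
  PySem.Str.join "" (text.toList.map (fun c => pvCodes.getD c (String.ofList [c])))

-- ===== PRECONDITION & SPEC =====
def Spec_encode_for_url_py (text : String) (out : String) : Prop := out = encode_for_url_py_alt text
instance (text : String) (out : String) : Decidable (Spec_encode_for_url_py text out) := by unfold Spec_encode_for_url_py; infer_instance

-- ===== CLAIM (what is proved, stated in full; the proofs are below) =====
def Claim_equal_encode_for_url_py : Prop := ∀ (text : String), Dom_encode_for_url_py text → Spec_encode_for_url_py text (encode_for_url_py text)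

-- ===== LEMMAS AND PROOFS =====

-- per-character substitution step made by a single-char .replace
def pvG (a : Char) (new : List Char) (c : Char) : List Char := if c = a then new else [c]

-- the fuel loop of Chars.replace, specialised to a one-character pattern, is a flatMap
theorem pv_go_single (a : Char) (new : List Char) :
    ∀ (fuel : Nat) (l acc : List Char), l.length ≤ fuel →
      PySem.Chars.replace.go [a] new fuel l acc = acc.reverse ++ l.flatMap (pvG a new) := by
  intro fuel
  induction fuel with
  | zero =>
    intro l acc h
    cases l with
    | nil => simp [PySem.Chars.replace.go.eq_def]
    | cons c t => simp at h
  | succ n ih =>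
    intro l acc h
    cases l with
    | nil => simp [PySem.Chars.replace.go.eq_def]
    | cons c t =>
      rw [PySem.Chars.replace.go.eq_def]
      by_cases hc : c = a
      · subst hc
        have hp : List.isPrefixOf [c] (c :: t) = true := by simp [List.isPrefixOf]
        simp [hp, ih t _ (by simpa using h), List.flatMap_cons, pvG]
      · have hp : List.isPrefixOf [a] (c :: t) = false := by
          simp [List.isPrefixOf]
          exact fun h' => (hc h'.symm).elim
        simp [hp, ih t _ (by simpa using h), List.flatMap_cons, pvG, hc]

theorem pv_replace_single (s : List Char) (a : Char) (new : List Char) :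
    PySem.Chars.replace s [a] new = s.flatMap (pvG a new) := by
  simpa using pv_go_single a new s.length s [] le_rfl

theorem pv_join_nil (xss : List (List Char)) : PySem.Chars.join [] xss = xss.flatten := by
  induction xss with
  | nil => rfl
  | cons h t ih => cases t <;> simp_all [PySem.Chars.join, List.intercalate, List.intersperse]

-- the nine A-side substitutions applied to a single character = B's table lookup
theorem pv_single_char (c : Char) :
    ((((((((pvG '$' "%24".toList c).flatMap (pvG '&' "%26".toList)).flatMap
        (pvG '+' "%2B".toList)).flatMap (pvG ',' "%2C".toList)).flatMap
        (pvG '/' "%2F".toList)).flatMap (pvG ':' "%3A".toList)).flatMap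
        (pvG ';' "%3B".toList)).flatMap (pvG '?' "%3F".toList)).flatMap (pvG '@' "%40".toList)
      = (pvCodes.getD c (String.ofList [c])).toList := by
  by_cases h1 : c = '$'; · subst h1; decide
  by_cases h2 : c = '&'; · subst h2; decide
  by_cases h3 : c = '+'; · subst h3; decide
  by_cases h4 : c = ','; · subst h4; decide
  by_cases h5 : c = '/'; · subst h5; decide
  by_cases h6 : c = ':'; · subst h6; decide
  by_cases h7 : c = ';'; · subst h7; decide
  by_cases h8 : c = '?'; · subst h8; decide
  by_cases h9 : c = '@'; · subst h9; decide
  have hmk : pvCodes = PySem.Dict.mk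
      [('$', "%24"), ('&', "%26"), ('+', "%2B"), (',', "%2C"), ('/', "%2F"),
       (':', "%3A"), (';', "%3B"), ('?', "%3F"), ('@', "%40")] := rfl
  simp [pvG, h1, h2, h3, h4, h5, h6, h7, h8, h9, hmk,
        PySem.Dict.getD,
        Ne.symm h1, Ne.symm h2, Ne.symm h3, Ne.symm h4, Ne.symm h5,
        Ne.symm h6, Ne.symm h7, Ne.symm h8, Ne.symm h9, PySem.Dict.get?]

-- the chain of nine flatMaps is the single-pass flatMap of B's lookup
theorem pv_chain (s : List Char) :
    ((((((((s.flatMap (pvG '$' "%24".toList)).flatMap (pvG '&' "%26".toList)).flatMap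
        (pvG '+' "%2B".toList)).flatMap (pvG ',' "%2C".toList)).flatMap
        (pvG '/' "%2F".toList)).flatMap (pvG ':' "%3A".toList)).flatMap
        (pvG ';' "%3B".toList)).flatMap (pvG '?' "%3F".toList)).flatMap (pvG '@' "%40".toList)
      = s.flatMap (fun c => (pvCodes.getD c (String.ofList [c])).toList) := by
  induction s with
  | nil => rfl
  | cons c t ih =>
    simp only [List.flatMap_cons, List.flatMap_append]
    rw [ih, pv_single_char c]

-- ===== VERDICT (by name: the statement is the Claim_ definition above) =====
theorem encode_for_url_py_spec : Claim_equal_encode_for_url_py := by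
  intro text _
  unfold Spec_encode_for_url_py
  apply String.toList_inj.mp
  simp only [encode_for_url_py, encode_for_url_py_alt, List.foldl,
    PySem.Str.toList_replace, PySem.Str.toList_join]
  rw [show ("$" : String).toList = ['$'] from rfl, show ("&" : String).toList = ['&'] from rfl,
      show ("+" : String).toList = ['+'] from rfl, show ("," : String).toList = [','] from rfl,
      show ("/" : String).toList = ['/'] from rfl, show (":" : String).toList = [':'] from rfl,
      show (";" : String).toList = [';'] from rfl, show ("?" : String).toList = ['?'] from rfl,
      show ("@" : String).toList = ['@'] from rfl, show ("" : String).toList = [] from rfl,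
      pv_join_nil]
  simp only [pv_replace_single]
  rw [pv_chain text.toList]
  simp only [List.map_map, List.flatten_eq_flatMap, List.flatMap_map, Function.comp, id_eq]
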